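-- pv_equiv track=rewrite | github.com/Datch06/Scrap_Email | crawl_worker_multi.py | is_valid_fr_domain
-- ===== SOURCE A (Python) =====
-- SOCIAL_DOMAINS = {
--     'facebook.com', 'twitter.com', 'instagram.com', 'linkedin.com',
--     'youtube.com', 'tiktok.com', 'pinterest.com', 'google.com',
--     'apple.com', 'microsoft.com', 'amazon.com', 'amazon.fr'
-- }
--
-- EXCLUDED_PATTERNS = {
--     'google.com', 'apple.com', 'microsoft.com', 'mozilla.org',
--     'amazon.com', 'amazon.es', 'amazon.fr', 'amzn.to',
--     'uecdn.es', 'cloudflare.com', 'akamai.net'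
-- }
--
-- BLACKLISTED_DOMAINS = {
--     'cnil.fr', 'gouv.fr', 'diplomatie.gouv.fr', 'education.gouv.fr',
--     'economie.gouv.fr', 'interieur.gouv.fr', 'service-public.fr',
--     'legifrance.gouv.fr', 'senat.fr', 'assemblee-nationale.fr'
-- }
--
-- def is_blacklisted_domain(domain: str) -> bool:
--     if not domain:
--         return True
--     if domain in BLACKLISTED_DOMAINS:
--         return True
--     for blacklisted in BLACKLISTED_DOMAINS:
--         if domain.endswith('.' + blacklisted):
--             return True
--     return False
--
-- def is_valid_fr_domain(domain: str) -> bool: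
--     if not domain or not domain.endswith('.fr'):
--         return False
--     if is_blacklisted_domain(domain):
--         return False
--     for excluded in EXCLUDED_PATTERNS:
--         if excluded in domain:
--             return False
--     for social in SOCIAL_DOMAINS:
--         if social in domain:
--             return False
--     return True
-- ===== SOURCE B (Python) =====
-- SOCIAL_DOMAINS = {
--     'facebook.com', 'twitter.com', 'instagram.com', 'linkedin.com',
--     'youtube.com', 'tiktok.com', 'pinterest.com', 'google.com',
--     'apple.com', 'microsoft.com', 'amazon.com', 'amazon.fr'
-- }
--
-- EXCLUDED_PATTERNS = {
--     'google.com', 'apple.com', 'microsoft.com', 'mozilla.org',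
--     'amazon.com', 'amazon.es', 'amazon.fr', 'amzn.to',
--     'uecdn.es', 'cloudflare.com', 'akamai.net'
-- }
--
-- BLACKLISTED_DOMAINS = {
--     'cnil.fr', 'gouv.fr', 'diplomatie.gouv.fr', 'education.gouv.fr',
--     'economie.gouv.fr', 'interieur.gouv.fr', 'service-public.fr',
--     'legifrance.gouv.fr', 'senat.fr', 'assemblee-nationale.fr'
-- }
--
-- _BAD_SUBSTRINGS = EXCLUDED_PATTERNS | SOCIAL_DOMAINS
--
--
-- def is_valid_fr_domain(domain: str) -> bool:
--     if not domain.endswith('.fr'):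
--         return False
--     # blacklist: probe the set with the domain's own dot-boundary suffixes,
--     # instead of scanning the set and calling endswith for each entry
--     if domain in BLACKLISTED_DOMAINS:
--         return False
--     for j, ch in enumerate(domain):
--         if ch == '.' and domain[j + 1:] in BLACKLISTED_DOMAINS:
--             return False
--     return not any(bad in domain for bad in _BAD_SUBSTRINGS)
-- ===== Notes on version B (the rewrite author's own statement) =====
-- stated objective: alternative
-- what changed: The blacklist test now derives the domain's own dot-boundary suffixes and probes the set with them (instead of scanning the set and calling endswith per entry), and the two substring loops are merged into one loop over the precomputed union set EXCLUDED_PATTERNS | SOCIAL_DOMAINS.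
import Mathlib
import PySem

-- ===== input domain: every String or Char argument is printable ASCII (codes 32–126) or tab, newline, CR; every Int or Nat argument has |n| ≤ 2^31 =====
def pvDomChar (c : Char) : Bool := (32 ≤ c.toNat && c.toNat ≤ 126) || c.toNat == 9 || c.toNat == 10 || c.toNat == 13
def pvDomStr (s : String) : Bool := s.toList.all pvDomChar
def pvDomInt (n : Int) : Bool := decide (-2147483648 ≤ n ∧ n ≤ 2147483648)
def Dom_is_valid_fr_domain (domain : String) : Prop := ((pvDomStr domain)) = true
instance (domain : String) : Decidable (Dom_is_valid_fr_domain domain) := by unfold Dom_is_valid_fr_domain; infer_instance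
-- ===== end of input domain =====

-- B restructures only the blacklist test: it probes the set with the domain's own dot-boundary
-- suffixes instead of scanning the set with endswith, and merges the two substring loops into one
-- over the union set (objective: alternative/idiomatic; same return value everywhere).

-- ===== PORT A =====
-- the module-level Python sets, ported as PySem.Set (distinct elements, literal order)
def pvSOCIAL_DOMAINS : PySem.Set (List Char) := PySem.Set.ofList
  ["facebook.com".toList, "twitter.com".toList, "instagram.com".toList, "linkedin.com".toList,
   "youtube.com".toList, "tiktok.com".toList, "pinterest.com".toList, "google.com".toList,
   "apple.com".toList, "microsoft.com".toList, "amazon.com".toList, "amazon.fr".toList]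

def pvEXCLUDED_PATTERNS : PySem.Set (List Char) := PySem.Set.ofList
  ["google.com".toList, "apple.com".toList, "microsoft.com".toList, "mozilla.org".toList,
   "amazon.com".toList, "amazon.es".toList, "amazon.fr".toList, "amzn.to".toList,
   "uecdn.es".toList, "cloudflare.com".toList, "akamai.net".toList]

def pvBLACKLISTED_DOMAINS : PySem.Set (List Char) := PySem.Set.ofList
  ["cnil.fr".toList, "gouv.fr".toList, "diplomatie.gouv.fr".toList, "education.gouv.fr".toList,
   "economie.gouv.fr".toList, "interieur.gouv.fr".toList, "service-public.fr".toList,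
   "legifrance.gouv.fr".toList, "senat.fr".toList, "assemblee-nationale.fr".toList]

def is_blacklisted_domain (domain : List Char) : Bool :=
  if domain = [] then true
  else if PySem.Set.contains pvBLACKLISTED_DOMAINS domain then true
  else pvBLACKLISTED_DOMAINS.any (fun blacklisted => PySem.Chars.endswith domain ('.' :: blacklisted))

def is_valid_fr_domain (domain : String) : Bool :=
  if domain.toList.isEmpty || !PySem.Chars.endswith domain.toList ('.' :: 'f' :: 'r' :: []) then false
  else if is_blacklisted_domain domain.toList then false
  else if pvEXCLUDED_PATTERNS.any (fun excluded => PySem.Chars.isIn excluded domain.toList) then false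
  else if pvSOCIAL_DOMAINS.any (fun social => PySem.Chars.isIn social domain.toList) then false
  else true

-- ===== PORT B =====
-- _BAD_SUBSTRINGS = EXCLUDED_PATTERNS | SOCIAL_DOMAINS
def pvBAD_SUBSTRINGS : PySem.Set (List Char) := PySem.Set.union pvEXCLUDED_PATTERNS pvSOCIAL_DOMAINS

def is_valid_fr_domain_alt (domain : String) : Bool :=
  if !PySem.Chars.endswith domain.toList ('.' :: 'f' :: 'r' :: []) then false
  else if PySem.Set.contains pvBLACKLISTED_DOMAINS domain.toList then false
  else if (PySem.List.enumerate domain.toList).any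
      (fun q => q.2 == '.' && PySem.Set.contains pvBLACKLISTED_DOMAINS
        (PySem.Chars.slice domain.toList (some (q.1 + 1)))) then false
  else !pvBAD_SUBSTRINGS.any (fun bad => PySem.Chars.isIn bad domain.toList)

-- ===== PRECONDITION & SPEC =====
def Spec_is_valid_fr_domain (domain : String) (out : Bool) : Prop := out = is_valid_fr_domain_alt domain
instance (domain : String) (out : Bool) : Decidable (Spec_is_valid_fr_domain domain out) := by unfold Spec_is_valid_fr_domain; infer_instance

-- ===== CLAIM (what is proved, stated in full; the proofs are below) =====
def Claim_equal_is_valid_fr_domain : Prop := ∀ (domain : String), Dom_is_valid_fr_domain domain → Spec_is_valid_fr_domain domain (is_valid_fr_domain domain)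

-- ===== LEMMAS AND PROOFS =====

-- 'for j, ch in enumerate(xs): if p(j, ch)' hits iff some index satisfies p
lemma pv_enum_any {α : Type} (xs : List α) (st : Int) (p : Int × α → Bool) :
    ((PySem.List.enumerate xs st).any p = true) ↔
      ∃ j : Nat, ∃ _ : j < xs.length, p (st + j, xs[j]) = true := by
  induction xs generalizing st with
  | nil => simp [PySem.List.enumerate]
  | cons x t ih =>
    simp only [PySem.List.enumerate, List.any_cons, Bool.or_eq_true, ih (st + 1)]
    constructor
    · rintro (h | ⟨j, hj, hp⟩)
      · exact ⟨0, by simp, by simpa using h⟩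
      · refine ⟨j + 1, by simp only [List.length_cons]; omega, ?_⟩
        have : st + ((j : Int) + 1) = st + 1 + j := by ring
        simpa [this] using hp
    · rintro ⟨j, hj, hp⟩
      cases j with
      | zero => exact Or.inl (by simpa using hp)
      | succ j =>
        refine Or.inr ⟨j, by simp only [List.length_cons] at hj; omega, ?_⟩
        have : st + 1 + (j : Int) = st + ((j : Int) + 1) := by ring
        simpa [this] using hp

-- '.'++b is a suffix of cs exactly when some dot at index j has b as the rest after it
lemma pv_dot_suffix (cs b : List Char) :
    ('.' :: b <:+ cs) ↔ ∃ j : Nat, ∃ _ : j < cs.length, cs[j] = '.' ∧ cs.drop (j + 1) = b := by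
  constructor
  · rintro ⟨p, rfl⟩
    refine ⟨p.length, by simp, ?_, ?_⟩
    · simp
    · simp
  · rintro ⟨j, hj, hdot, hdrop⟩
    refine ⟨cs.take j, ?_⟩
    have h1 : cs[j] :: cs.drop (j + 1) = cs.drop j := List.getElem_cons_drop hj
    calc cs.take j ++ '.' :: b = cs.take j ++ cs[j] :: cs.drop (j + 1) := by rw [hdot, hdrop]
      _ = cs.take j ++ cs.drop j := by rw [h1]
      _ = cs := List.take_append_drop j cs

-- A's endswith scan over the blacklist equals B's dot-boundary suffix probe
lemma pv_blacklist_bridge (cs : List Char) :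
    pvBLACKLISTED_DOMAINS.any (fun blacklisted => PySem.Chars.endswith cs ('.' :: blacklisted))
      = (PySem.List.enumerate cs).any
          (fun q => q.2 == '.' && PySem.Set.contains pvBLACKLISTED_DOMAINS (PySem.Chars.slice cs (some (q.1 + 1)))) := by
  apply Bool.eq_iff_iff.mpr
  rw [List.any_eq_true, pv_enum_any]
  constructor
  · rintro ⟨b, hb, hbe⟩
    rw [PySem.Chars.endswith_iff] at hbe
    obtain ⟨j, hj, hdot, hdrop⟩ := (pv_dot_suffix cs b).mp hbe
    refine ⟨j, hj, ?_⟩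
    have hsl : PySem.List.slice cs (some ((j : Int) + 1)) = cs.drop (j + 1) := by
      rw [PySem.List.slice_from cs (by positivity)]
      norm_num
    simpa [hsl, hdrop, hdot] using hb
  · rintro ⟨j, hj, hp⟩
    have hsl : PySem.List.slice cs (some ((j : Int) + 1)) = cs.drop (j + 1) := by
      rw [PySem.List.slice_from cs (by positivity)]
      norm_num
    simp at hp
    obtain ⟨hdot, hmem⟩ := hp
    rw [hsl] at hmem
    refine ⟨cs.drop (j + 1), hmem, ?_⟩
    rw [PySem.Chars.endswith_iff]
    exact (pv_dot_suffix cs _).mpr ⟨j, hj, hdot, rfl⟩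

-- A's two substring loops equal B's single loop over the union set
lemma pv_bad_union (cs : List Char) :
    pvBAD_SUBSTRINGS.any (fun bad => PySem.Chars.isIn bad cs)
      = (pvEXCLUDED_PATTERNS.any (fun e => PySem.Chars.isIn e cs)
          || pvSOCIAL_DOMAINS.any (fun s => PySem.Chars.isIn s cs)) := by
  apply Bool.eq_iff_iff.mpr
  simp only [Bool.or_eq_true, List.any_eq_true, pvBAD_SUBSTRINGS]
  constructor
  · rintro ⟨b, hb, hin⟩
    rcases (PySem.Set.mem_union _ _ _).mp hb with h | h
    · exact Or.inl ⟨b, h, hin⟩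
    · exact Or.inr ⟨b, h, hin⟩
  · rintro (⟨b, hb, hin⟩ | ⟨b, hb, hin⟩)
    · exact ⟨b, (PySem.Set.mem_union _ _ _).mpr (Or.inl hb), hin⟩
    · exact ⟨b, (PySem.Set.mem_union _ _ _).mpr (Or.inr hb), hin⟩

lemma pv_main (domain : String) : is_valid_fr_domain domain = is_valid_fr_domain_alt domain := by
  unfold is_valid_fr_domain is_valid_fr_domain_alt
  cases hend : PySem.Chars.endswith domain.toList ('.' :: 'f' :: 'r' :: []) with
  | false => simp
  | true =>
    have hne : domain.toList ≠ [] := by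
      intro h
      rw [h] at hend
      exact absurd hend (by decide)
    have hemp : domain.toList.isEmpty = false := by simpa [List.isEmpty_iff] using hne
    rw [hemp]
    simp only [Bool.not_true, Bool.or_false, Bool.false_eq_true, if_false]
    unfold is_blacklisted_domain
    rw [if_neg hne]
    cases hc : PySem.Set.contains pvBLACKLISTED_DOMAINS domain.toList with
    | true => simp
    | false =>
      simp only [Bool.false_eq_true, if_false]
      rw [pv_blacklist_bridge]
      cases hb : (PySem.List.enumerate domain.toList).any
          (fun q => q.2 == '.' && PySem.Set.contains pvBLACKLISTED_DOMAINS
            (PySem.Chars.slice domain.toList (some (q.1 + 1)))) with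
      | true => simp
      | false =>
        simp only [Bool.false_eq_true, if_false]
        rw [pv_bad_union]
        cases hex : pvEXCLUDED_PATTERNS.any (fun e => PySem.Chars.isIn e domain.toList) with
        | true => simp
        | false =>
          cases hso : pvSOCIAL_DOMAINS.any (fun s => PySem.Chars.isIn s domain.toList) with
          | true => simp
          | false => simp

-- ===== VERDICT (by name: the statement is the Claim_ definition above) =====
theorem is_valid_fr_domain_spec : Claim_equal_is_valid_fr_domain := by
  intro domain _
  unfold Spec_is_valid_fr_domain
  exact pv_main domain
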